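-- pv_equiv track=rewrite | github.com/paolostyle/advent-of-code-2022 | advent_of_code_2022/day03/day03.py | part_2
-- ===== SOURCE A (Python) =====
-- def get_priority(char: str) -> int:
--     if char.islower():
--         return ord(char) - 96
--     else:
--         return ord(char) - 64 + 26
--
-- def part_2(input: str) -> int:
--     badge_priorities = []
--     elves = input.splitlines()
--
--     for i in range(0, len(elves), 3):
--         group = [set(elf) for elf in elves[i : i + 3]]
--         (common,) = set.intersection(*group)
--         badge_priorities.append(get_priority(common))
--
--     return sum(badge_priorities)
-- ===== SOURCE B (Python) =====
-- def get_priority(char: str) -> int: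
--     if char.islower():
--         return ord(char) - 96
--     else:
--         return ord(char) - 64 + 26
--
-- def part_2(input: str) -> int:
--     total = 0
--     lines = input.splitlines()
--     while lines:
--         group, lines = lines[:3], lines[3:]
--         counter = {}
--         for elf in group:
--             for c in set(elf):
--                 counter[c] = counter.get(c, 0) + 1
--         (common,) = [c for c in counter if counter[c] == len(group)]
--         total += get_priority(common)
--     return total
-- ===== Notes on version B (the rewrite author's own statement) =====
-- stated objective: alternative
-- what changed: B replaces per-group set.intersection with a frequency table tallying each elf's distinct characters and selects the character whose tally equals the group size.
-- outside the precondition, e.g. on part_2('ab\ncd\nef'): A raises ValueError, B raises ValueError; on part_2('ab\nab\nab'): A raises ValueError, B raises ValueError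
import Mathlib
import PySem

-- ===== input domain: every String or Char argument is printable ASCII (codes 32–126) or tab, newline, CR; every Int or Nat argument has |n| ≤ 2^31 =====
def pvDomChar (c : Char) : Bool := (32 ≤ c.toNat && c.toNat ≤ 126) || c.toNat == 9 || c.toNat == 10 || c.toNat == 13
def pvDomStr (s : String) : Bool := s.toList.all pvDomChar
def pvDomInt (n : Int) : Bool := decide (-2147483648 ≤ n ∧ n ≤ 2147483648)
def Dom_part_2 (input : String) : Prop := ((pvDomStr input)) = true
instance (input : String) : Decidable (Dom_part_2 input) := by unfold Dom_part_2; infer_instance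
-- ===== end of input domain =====

-- B replaces per-group set.intersection by a character-frequency table over each elf's
-- distinct characters, selecting the character whose tally equals the group size (objective: alternative).

-- ===== PORT A =====
-- shared module helper (both Pythons call the same get_priority)
def get_priority (char : Char) : Int :=
  if PySem.Chars.islower char then (char.toNat : Int) - 96
  else (char.toNat : Int) - 64 + 26

def part_2 (input : String) : Int :=
  let elves := PySem.Str.splitlines input
  let badge_priorities :=
    (PySem.List.pyRange 0 (elves.length : Int) 3).foldl (fun acc i =>
      let group := (PySem.List.slice elves (some i) (some (i + 3))).map
        (fun elf => PySem.Set.ofList elf.toList)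
      match group with
      | [] => acc          -- unreachable: every slice taken by the loop is nonempty
      | g :: rest =>
        match rest.foldl PySem.Set.inter g with
        | [common] => acc ++ [get_priority common]
        | _ => acc         -- ValueError in Python (unpack of a non-singleton); excluded by Pre_
      ) []
  badge_priorities.sum

-- ===== PORT B =====
-- Source B's copy of the module helper get_priority
def get_priority_alt (char : Char) : Int :=
  if PySem.Chars.islower char then (char.toNat : Int) - 96
  else (char.toNat : Int) - 64 + 26

def pvAltLoop (lines : List String) : Int :=
  match lines with
  | [] => 0
  | l :: rest =>
    let group := l :: rest.take 2          -- lines[:3]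
    let counter := group.foldl (fun d elf =>
        (PySem.Set.ofList elf.toList).foldl (fun d c => d.modify c 0 (fun n => n + 1)) d)
      PySem.Dict.empty
    match counter.keys.filter (fun c => counter.getD c 0 == (group.length : Int)) with
    | common :: [] => get_priority_alt common + pvAltLoop (rest.drop 2)   -- lines[3:]
    | [] => 0            -- ValueError in Python (unpack of a non-singleton); excluded by Pre_
    | _ :: _ :: _ => 0   -- ValueError likewise
  termination_by lines.length
  decreasing_by simp [List.length_drop]

def part_2_alt (input : String) : Int :=
  pvAltLoop (PySem.Str.splitlines input)

-- ===== PRECONDITION & SPEC =====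
-- a group of lines has exactly one character common to all of its lines
def pvUniqueCommon (chunk : List String) : Bool :=
  match chunk with
  | [] => false
  | g :: rest =>
    ((PySem.List.dedup g.toList).filter
      (fun c => rest.all (fun l => l.toList.contains c))).length == 1

-- Pre_ excludes exactly the inputs where some 3-line group (a trailing group may be shorter)
-- does not have a unique common character: there BOTH Pythons raise ValueError
-- (unpacking a non-singleton).
def Pre_part_2 (input : String) : Prop :=
  ∀ i ∈ List.range (((PySem.Str.splitlines input).length + 2) / 3),
    pvUniqueCommon (((PySem.Str.splitlines input).drop (3 * i)).take 3) = true

instance (input : String) : Decidable (Pre_part_2 input) := by unfold Pre_part_2; infer_instance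

def pvWitness_part_2 : String := "ab\nbc\nbd"

def Spec_part_2 (input : String) (out : Int) : Prop := out = part_2_alt input
instance (input : String) (out : Int) : Decidable (Spec_part_2 input out) := by unfold Spec_part_2; infer_instance

-- ===== CLAIM (what is proved, stated in full; the proofs are below) =====
def Claim_equal_part_2 : Prop := ∀ (input : String), Dom_part_2 input → Pre_part_2 input → Spec_part_2 input (part_2 input)

-- ===== LEMMAS AND PROOFS =====

-- the groups lines[0:3], lines[3:6], … of both loops (proof-side view)
def pvChunks3 : List String → List (List String)
  | [] => []
  | [a] => [[a]]
  | [a, b] => [[a, b]]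
  | a :: b :: c :: rest => [a, b, c] :: pvChunks3 rest

lemma pvChunks3_nil : pvChunks3 ([] : List String) = [] := rfl

lemma pvChunks3_cons (l : String) (rest : List String) :
    pvChunks3 (l :: rest) = (l :: rest.take 2) :: pvChunks3 (rest.drop 2) := by
  rcases rest with _ | ⟨b, _ | ⟨c, t⟩⟩ <;> simp [pvChunks3]

-- pvChunks3 as the list of index-sliced groups (the form Pre_ quantifies over)
lemma pvChunks3_eq (lines : List String) :
    pvChunks3 lines
    = (List.range ((lines.length + 2) / 3)).map (fun i => (lines.drop (3 * i)).take 3) := by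
  induction lines using pvChunks3.induct with
  | case1 => simp [pvChunks3]
  | case2 a => simp [pvChunks3]
  | case3 a b => simp [pvChunks3]
  | case4 a b c rest ih =>
    have hm : ((a :: b :: c :: rest).length + 2) / 3 = (rest.length + 2) / 3 + 1 := by
      simp; omega
    rw [pvChunks3, ih, hm, List.range_succ_eq_map]
    simp only [List.map_cons, List.map_map]
    refine congrArg₂ List.cons (by simp) ?_
    refine List.map_congr_left (fun i _ => ?_)
    simp [Function.comp, Nat.mul_succ, Nat.succ_eq_add_one]

-- per-chunk value produced by A's loop body (as the list it appends)
def gA (chunk : List String) : List Int :=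
  match chunk.map (fun elf => PySem.Set.ofList elf.toList) with
  | [] => []
  | g :: rest =>
    match rest.foldl PySem.Set.inter g with
    | [common] => [get_priority common]
    | _ => []

-- B's frequency table over a group, and its selection list
def counterOf (group : List String) : PySem.Dict Char Int :=
  group.foldl (fun d elf =>
      (PySem.Set.ofList elf.toList).foldl (fun d c => d.modify c 0 (fun n => n + 1)) d)
    PySem.Dict.empty

def filtOf (group : List String) : List Char :=
  (counterOf group).keys.filter (fun c => (counterOf group).getD c 0 == (group.length : Int))

-- per-chunk value produced by B's loop body
def gB (group : List String) : Int :=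
  match filtOf group with
  | common :: [] => get_priority_alt common
  | [] => 0
  | _ :: _ :: _ => 0

lemma pyRange3_nil (a b : Int) (h : b ≤ a) : PySem.List.pyRange a b 3 = [] := by
  rw [PySem.List.pyRange_of_pos a b (by norm_num)]
  simp [if_neg (by omega : ¬ a < b)]

lemma pyRange3_cons (a b : Int) (h : a < b) :
    PySem.List.pyRange a b 3 = a :: PySem.List.pyRange (a + 3) b 3 := by
  rw [PySem.List.pyRange_of_pos a b (by norm_num),
      PySem.List.pyRange_of_pos (a + 3) b (by norm_num)]
  rw [if_pos h]
  have h1 : ((b - a + 3 - 1) / 3).toNat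
      = (if a + 3 < b then ((b - (a + 3) + 3 - 1) / 3).toNat else 0) + 1 := by
    split_ifs <;> omega
  rw [h1, List.range_succ_eq_map]
  simp only [List.map_cons, List.map_map]
  refine congrArg₂ List.cons (by push_cast; ring) ?_
  exact List.map_congr_left (fun k _ => by
    simp only [Function.comp_apply, Nat.succ_eq_add_one]; push_cast; ring)

-- the counter really tallies, for each character, the number of elves containing it
lemma counterOf_spec (group : List String) :
    (counterOf group).keys = PySem.Set.ofList ((group.map (fun elf => PySem.Set.ofList elf.toList)).flatten)
    ∧ ∀ c, (counterOf group).getD c 0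
        = (List.count c ((group.map (fun elf => PySem.Set.ofList elf.toList)).flatten) : Int) := by
  have hrw : counterOf group
      = List.foldl (fun d c => d.modify c 0 (fun n => n + 1)) PySem.Dict.empty
          ((group.map (fun elf => PySem.Set.ofList elf.toList)).flatten) := by
    rw [counterOf, List.foldl_flatten, List.foldl_map]
  constructor
  · rw [hrw, PySem.Dict.keys_foldl_modify _ 0 (fun _ _ n => n + 1)]
    simp [PySem.Set.update, PySem.Set.ofList_eq_foldl]
  · intro c
    rw [hrw, PySem.Dict.getD_foldl_modify_add_one]
    simp

-- number of occurrences of c in the concatenation of each elf's distinct characters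
lemma count_flat (group : List String) (c : Char) :
    List.count c ((group.map (fun elf => PySem.Set.ofList elf.toList)).flatten)
    = List.countP (fun elf => decide (c ∈ elf.toList)) group := by
  induction group with
  | nil => simp
  | cons g rest ih =>
    simp only [List.map_cons, List.flatten_cons, List.count_append, ih, List.countP_cons]
    by_cases hm : c ∈ g.toList
    · rw [List.count_eq_one_of_mem (PySem.Set.nodup_ofList _) (by simpa [PySem.Set.mem_ofList] using hm)]
      simp [hm]; omega
    · rw [List.count_eq_zero_of_not_mem (by simpa [PySem.Set.mem_ofList] using hm)]
      simp [hm]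

-- fold-intersection membership and nodup
lemma inter_foldl (ts : List (PySem.Set Char)) (s : PySem.Set Char) (hs : List.Nodup s) :
    List.Nodup (ts.foldl PySem.Set.inter s)
    ∧ ∀ c, c ∈ ts.foldl PySem.Set.inter s ↔ c ∈ s ∧ ∀ t ∈ ts, c ∈ t := by
  induction ts generalizing s with
  | nil => simpa using hs
  | cons t ts ih =>
    obtain ⟨h1, h2⟩ := ih (s.inter t) (PySem.Set.nodup_inter s t hs)
    refine ⟨h1, fun c => ?_⟩
    rw [List.foldl_cons, h2, PySem.Set.mem_inter]
    constructor
    · rintro ⟨⟨hx, hy⟩, hz⟩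
      refine ⟨hx, fun u hu => ?_⟩
      rcases List.mem_cons.mp hu with rfl | hu
      · exact hy
      · exact hz u hu
    · rintro ⟨hx, hz⟩
      exact ⟨⟨hx, hz t (by simp)⟩, fun u hu => hz u (by simp [hu])⟩

-- a Nodup list with the same members as a singleton IS that singleton
lemma nodup_mem_singleton {P : List Char} {c : Char} (hP : List.Nodup P)
    (h : ∀ x, x ∈ P ↔ x = c) : P = [c] := by
  rw [← List.perm_singleton]
  exact (List.perm_ext_iff_of_nodup hP (by simp)).2 (by simpa using h)

-- the heart: on a group with a unique common character, A's intersection and B's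
-- count-filtered key list are the same singleton
lemma chunk_sel (g : String) (rest : List String) (h : pvUniqueCommon (g :: rest) = true) :
    ∃ c, ((rest.map (fun elf => PySem.Set.ofList elf.toList)).foldl
            PySem.Set.inter (PySem.Set.ofList g.toList)) = [c]
        ∧ filtOf (g :: rest) = [c] := by
  -- the common-membership predicate
  set Common : Char → Prop := fun c => c ∈ g.toList ∧ ∀ l ∈ rest, c ∈ l.toList with hC
  -- Pre_'s witness list
  have hP : ∃ c, ((PySem.List.dedup g.toList).filter
      (fun c => rest.all (fun l => l.toList.contains c))) = [c] := by
    rw [pvUniqueCommon] at h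
    simp only [beq_iff_eq] at h
    exact List.length_eq_one_iff.mp h
  obtain ⟨c, hc⟩ := hP
  have hmemP : ∀ x, Common x ↔ x = c := by
    intro x
    have : x ∈ ((PySem.List.dedup g.toList).filter
        (fun c => rest.all (fun l => l.toList.contains c))) ↔ Common x := by
      simp [List.mem_filter, hC]
    rw [← this, hc]; simp
  refine ⟨c, ?_, ?_⟩
  · -- A's intersection
    obtain ⟨hnd, hmem⟩ := inter_foldl (rest.map (fun elf => PySem.Set.ofList elf.toList))
      (PySem.Set.ofList g.toList) (PySem.Set.nodup_ofList _)
    refine nodup_mem_singleton hnd (fun x => ?_)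
    rw [hmem, ← hmemP, hC]
    simp [PySem.Set.mem_ofList]
  · -- B's filtered key list
    obtain ⟨hkeys, hgetD⟩ := counterOf_spec (g :: rest)
    have hnd : List.Nodup (filtOf (g :: rest)) := by
      rw [filtOf, hkeys]
      exact List.Nodup.filter _ (PySem.Set.nodup_ofList _)
    refine nodup_mem_singleton hnd (fun x => ?_)
    rw [← hmemP x, filtOf, List.mem_filter, hkeys, PySem.Set.mem_ofList, hgetD, count_flat]
    constructor
    · rintro ⟨hx, hcnt⟩
      simp only [beq_iff_eq, Nat.cast_inj] at hcnt
      have hall := List.countP_eq_length.mp hcnt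
      have hg := hall g (by simp)
      simp only [decide_eq_true_eq] at hg
      refine ⟨hg, fun l hl => ?_⟩
      have := hall l (by simp [hl])
      simpa using this
    · rintro ⟨hg, hrest⟩
      have hall : ∀ elf ∈ (g :: rest), (fun elf => decide (x ∈ elf.toList)) elf = true := by
        intro elf helf
        rcases List.mem_cons.mp helf with rfl | helf
        · simpa using hg
        · simpa using hrest elf helf
      refine ⟨?_, by simp [List.countP_eq_length.mpr hall]⟩
      exact List.mem_flatten.mpr ⟨_, List.mem_map_of_mem (by simp : g ∈ g :: rest), by
        simpa [PySem.Set.mem_ofList] using hg⟩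

-- A's loop from index k, as a flatMap of gA over the remaining chunks
lemma A_loop (elves : List String) (fuel : Nat) : ∀ (k : Nat) (acc : List Int),
    elves.length ≤ k + fuel →
    (PySem.List.pyRange (k : Int) (elves.length : Int) 3).foldl (fun acc i =>
      let group := (PySem.List.slice elves (some i) (some (i + 3))).map
        (fun elf => PySem.Set.ofList elf.toList)
      match group with
      | [] => acc
      | g :: rest =>
        match rest.foldl PySem.Set.inter g with
        | [common] => acc ++ [get_priority common]
        | _ => acc) acc
    = acc ++ (pvChunks3 (elves.drop k)).flatMap gA := by
  induction fuel with
  | zero =>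
    intro k acc hk
    rw [pyRange3_nil _ _ (by exact_mod_cast hk),
        List.drop_eq_nil_of_le (by omega), pvChunks3_nil]
    simp
  | succ fuel ih =>
    intro k acc hk
    cases hdrop : elves.drop k with
    | nil =>
      have hlen : elves.length ≤ k := by
        by_contra hc
        exact absurd hdrop (by simp [List.drop_eq_nil_iff]; omega)
      rw [pyRange3_nil _ _ (by exact_mod_cast hlen), pvChunks3_nil]
      simp
    | cons l rest' =>
      have hklen : k < elves.length := by
        rcases Nat.lt_or_ge k elves.length with h | h
        · exact h
        · rw [List.drop_eq_nil_of_le h] at hdrop; cases hdrop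
      rw [pyRange3_cons _ _ (by exact_mod_cast hklen), List.foldl_cons]
      have h3 : ((k : Int) + 3) = ((k + 3 : Nat) : Int) := by push_cast; ring
      have hdrop3 : elves.drop (k + 3) = rest'.drop 2 := by
        have : elves.drop (k + 3) = (elves.drop k).drop 3 := by
          rw [List.drop_drop]
        rw [this, hdrop]
        simp
      have hslice : PySem.List.slice elves (some (k : Int)) (some ((k : Int) + 3))
          = l :: rest'.take 2 := by
        have := PySem.List.slice_natCast_add elves k 3
        rw [show ((k : Int) + 3) = ((k : Int) + ((3 : Nat) : Int)) from by push_cast; ring, this,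
            hdrop]
        simp [List.take_succ_cons]
      rw [hslice, h3, ih (k + 3) _ (by omega), hdrop3,
          pvChunks3_cons, List.flatMap_cons, ← List.append_assoc]
      congr 1
      simp only [List.map_cons, List.map_take, gA]
      rcases hI : List.foldl PySem.Set.inter (PySem.Set.ofList l.toList)
          ((rest'.map (fun elf => PySem.Set.ofList elf.toList)).take 2)
        with _ | ⟨c, _ | ⟨c', t⟩⟩ <;> simp [hI]

lemma A_eq (input : String) :
    part_2 input = ((pvChunks3 (PySem.Str.splitlines input)).flatMap gA).sum := by
  have h := A_loop (PySem.Str.splitlines input) (PySem.Str.splitlines input).length 0 [] (by omega)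
  simp only [Nat.cast_zero, List.drop_zero, List.nil_append] at h
  exact congrArg List.sum h

-- B's loop as a map of gB over the chunks (under the unique-common-character hypothesis)
lemma B_loop : ∀ (n : Nat) (lines : List String), lines.length ≤ n →
    (∀ chunk ∈ pvChunks3 lines, pvUniqueCommon chunk = true) →
    pvAltLoop lines = ((pvChunks3 lines).map gB).sum := by
  intro n
  induction n with
  | zero =>
    intro lines hn _
    have : lines = [] := List.eq_nil_of_length_eq_zero (by omega)
    subst this
    rw [pvChunks3_nil, pvAltLoop]
    simp
  | succ n ih =>
    intro lines hn h
    cases lines with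
    | nil =>
      rw [pvChunks3_nil, pvAltLoop]
      simp
    | cons l rest =>
      obtain ⟨c, _, hB⟩ := chunk_sel l (rest.take 2) (by
        have := h (l :: rest.take 2) (by rw [pvChunks3_cons]; simp)
        simpa using this)
      have hB' : filtOf (l :: rest.take 2) = [c] := hB
      rw [pvAltLoop, pvChunks3_cons, List.map_cons, List.sum_cons]
      rw [filtOf, counterOf] at hB'
      simp only [List.foldl_cons] at hB' ⊢
      rw [hB']
      rw [ih (rest.drop 2) (by simp at hn ⊢; omega)
            (fun chunk hc => h chunk (by rw [pvChunks3_cons]; simp [hc])),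
          gB, hB]

-- A and B agree chunkwise
lemma gA_eq_gB (ch : List String) (hu : pvUniqueCommon ch = true) : gA ch = [gB ch] := by
  cases ch with
  | nil => simp [pvUniqueCommon] at hu
  | cons g rest =>
    obtain ⟨c, hA, hB⟩ := chunk_sel g rest hu
    simp [gA, gB, hA, hB, get_priority, get_priority_alt]

-- chunkwise sums agree
lemma sum_eq (chunks : List (List String))
    (h : ∀ ch ∈ chunks, pvUniqueCommon ch = true) :
    (chunks.flatMap gA).sum = (chunks.map gB).sum := by
  induction chunks with
  | nil => simp
  | cons ch chs ih =>
    rw [List.flatMap_cons, List.map_cons, List.sum_append, List.sum_cons,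
        gA_eq_gB ch (h ch (by simp)), ih (fun c hc => h c (by simp [hc]))]
    simp

-- ===== VERDICT (by name: the statement is the Claim_ definition above) =====
theorem part_2_spec : Claim_equal_part_2 := by
  intro input _ hpre
  unfold Spec_part_2 part_2_alt
  unfold Pre_part_2 at hpre
  have hpre' : ∀ chunk ∈ pvChunks3 (PySem.Str.splitlines input), pvUniqueCommon chunk = true := by
    intro chunk hc
    rw [pvChunks3_eq] at hc
    obtain ⟨i, hi, rfl⟩ := List.mem_map.mp hc
    exact hpre i hi
  rw [A_eq, B_loop (PySem.Str.splitlines input).length _ le_rfl hpre']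
  exact sum_eq _ hpre'
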